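-- pv_equiv track=rewrite | github.com/PengYangchao0808/ReactionProfileHunter | rph_core/utils/molecular_graph.py | _get_local_subgraph
-- ===== SOURCE A (Python) =====
-- from typing import Any, Optional, List, Tuple, Dict, Set
--
-- def _get_local_subgraph(
--     original_graph: Dict[int, List[int]],
--     cut_graph: Dict[int, List[int]],
--     start_atom: int,
--     depth: int = 2
-- ) -> Set[int]:
--     """
--     Get local subgraph around start_atom up to specified depth.
--     Uses original graph but respects cut graph connectivity.
--
--     Args:
--         original_graph: Full bond graph
--         cut_graph: Graph with forming bonds removed
--         start_atom: Central atom
--         depth: Number of hops to include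
--
--     Returns:
--         Set of atoms in local subgraph
--     """
--     visited = {start_atom}
--     current_level = {start_atom}
--
--     for _ in range(depth):
--         next_level = set()
--         for atom in current_level:
--             # Use original graph for connectivity, but stay within cut component
--             for neighbor in original_graph.get(atom, []):
--                 # Check if neighbor is reachable in cut graph (same component)
--                 if neighbor not in visited:
--                     # Verify connectivity via BFS in cut graph
--                     if _is_reachable(cut_graph, start_atom, neighbor):
--                         visited.add(neighbor)
--                         next_level.add(neighbor)
--         current_level = next_level
--
--     return visited
--
-- def _is_reachable(graph: Dict[int, List[int]], start: int, end: int) -> bool: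
--     """Check if end is reachable from start in graph using BFS."""
--     if start == end:
--         return True
--
--     visited = {start}
--     queue = [start]
--
--     while queue:
--         node = queue.pop(0)
--         for neighbor in graph.get(node, []):
--             if neighbor == end:
--                 return True
--             if neighbor not in visited:
--                 visited.add(neighbor)
--                 queue.append(neighbor)
--
--     return False
-- ===== SOURCE B (Python) =====
-- from typing import List, Dict, Set
-- from collections import deque
--
--
-- def _get_local_subgraph(
--     original_graph: Dict[int, List[int]],
--     cut_graph: Dict[int, List[int]],
--     start_atom: int,
--     depth: int = 2
-- ) -> Set[int]:
--     # 1) One BFS in the cut graph collects start_atom's connected component.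
--     # 2) One depth-limited BFS over the original graph (a single queue of
--     #    (node, dist) pairs, no level sets) keeps only component members.
--     component = {start_atom}
--     comp_queue = deque([start_atom])
--     while comp_queue:
--         node = comp_queue.popleft()
--         for neighbor in cut_graph.get(node, []):
--             if neighbor not in component:
--                 component.add(neighbor)
--                 comp_queue.append(neighbor)
--
--     visited = {start_atom}
--     queue = deque([(start_atom, 0)])
--     while queue:
--         node, d = queue.popleft()
--         if d < depth:
--             for neighbor in original_graph.get(node, []):
--                 if neighbor not in visited and neighbor in component:
--                     visited.add(neighbor)
--                     queue.append((neighbor, d + 1))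
--     return visited
-- ===== Notes on version B (the rewrite author's own statement) =====
-- stated objective: alternative
-- what changed: B computes start_atom's cut-graph component once with a single BFS and then runs one depth-limited queue BFS of (node, dist) pairs over the original graph with a component-membership test, replacing A's per-level set expansion that launches a fresh BFS reachability check for every neighbor.
import Mathlib
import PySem

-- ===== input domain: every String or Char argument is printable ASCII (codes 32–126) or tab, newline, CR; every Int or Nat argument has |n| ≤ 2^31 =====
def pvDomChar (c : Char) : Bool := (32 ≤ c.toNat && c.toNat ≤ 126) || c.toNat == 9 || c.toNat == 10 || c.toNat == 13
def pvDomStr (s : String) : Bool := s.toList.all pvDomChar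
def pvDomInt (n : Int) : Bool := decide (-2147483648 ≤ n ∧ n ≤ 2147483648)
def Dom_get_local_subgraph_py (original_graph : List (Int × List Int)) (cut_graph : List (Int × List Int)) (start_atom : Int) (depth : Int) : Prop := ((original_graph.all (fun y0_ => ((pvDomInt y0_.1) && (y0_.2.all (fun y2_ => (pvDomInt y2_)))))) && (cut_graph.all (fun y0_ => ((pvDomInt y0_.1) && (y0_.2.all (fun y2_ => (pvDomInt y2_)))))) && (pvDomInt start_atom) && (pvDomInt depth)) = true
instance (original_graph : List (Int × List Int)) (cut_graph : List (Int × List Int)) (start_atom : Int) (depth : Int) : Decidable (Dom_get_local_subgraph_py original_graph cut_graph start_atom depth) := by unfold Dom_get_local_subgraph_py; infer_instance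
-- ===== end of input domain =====

-- B computes start_atom's cut-graph component once by a single BFS and then runs one
-- depth-limited queue BFS over the original graph with a component-membership test,
-- instead of A's per-level set expansion launching a BFS reachability check per neighbor.
-- Sets (Python set) are modelled as PySem.Set; the returned set is compared as a finite set.

-- ===== PORT A =====
-- shared termination bookkeeping (cited by the ports' decreasing_by): the BFS queues only
-- ever receive adjacency-list members, so `2 * #unvisited-universe + |queue|` decreases.
def pvUniv (g : List (Int × List Int)) : List Int :=
  PySem.Set.ofList (g.flatMap (fun p => p.2))

def pvCnt (univ : List Int) (v : PySem.Set Int) : Nat :=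
  (univ.filter (fun x => !PySem.Set.contains v x)).length

theorem pvCnt_add (univ : List Int) (hu : univ.Nodup) (v : PySem.Set Int) (n : Int)
    (hn : n ∈ univ) (hv : n ∉ v) :
    pvCnt univ (PySem.Set.add v n) + 1 = pvCnt univ v := by
  have hadd : PySem.Set.add v n = v ++ [n] := PySem.Set.add_of_not_mem hv
  induction univ with
  | nil => cases hn
  | cons u us ih =>
    rcases List.nodup_cons.mp hu with ⟨hu1, hu2⟩
    simp only [pvCnt, List.filter_cons]
    by_cases h : u = n
    · subst h
      have htail : List.filter (fun x => !PySem.Set.contains (PySem.Set.add v u) x) us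
          = List.filter (fun x => !PySem.Set.contains v x) us := by
        apply List.filter_congr
        intro x hx
        have hxu : x ≠ u := fun hh => hu1 (hh ▸ hx)
        simp [hadd, PySem.Set.contains_eq_listContains, hxu]
      have hnew : (!PySem.Set.contains (PySem.Set.add v u) u) = false := by
        simp [hadd, PySem.Set.contains_eq_listContains]
      have hold : (!PySem.Set.contains v u) = true := by
        simp [PySem.Set.contains_eq_listContains]; exact hv
      rw [hnew, hold, htail]
      simp
    · have hn' : n ∈ us := (List.mem_cons.mp hn).resolve_left (fun hh => h hh.symm)
      have hhead : PySem.Set.contains (PySem.Set.add v n) u = PySem.Set.contains v u := by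
        simp [hadd, PySem.Set.contains_eq_listContains]
        exact fun hh => absurd hh h
      have hrec := ih hu2 hn'
      simp only [pvCnt] at hrec
      rw [hhead]
      by_cases hcu : (!PySem.Set.contains v u) = true
      · rw [if_pos hcu, if_pos hcu]
        simp only [List.length_cons]
        omega
      · rw [if_neg hcu, if_neg hcu]
        omega

theorem pv_getD_sub (d : PySem.Dict Int (List Int)) (k : Int) (n : Int)
    (hn : n ∈ d.getD k []) : n ∈ pvUniv d.items := by
  rcases d with ⟨items⟩
  simp only [pvUniv, PySem.Set.mem_ofList, List.mem_flatMap]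
  induction items with
  | nil => simp [PySem.Dict.getD, PySem.Dict.get?] at hn
  | cons p ps ih =>
    by_cases h : p.1 = k
    · refine ⟨p, List.mem_cons_self, ?_⟩
      simpa [PySem.Dict.getD, PySem.Dict.get?, h] using hn
    · have : n ∈ PySem.Dict.getD ⟨ps⟩ k [] := by
        simpa [PySem.Dict.getD, PySem.Dict.get?, h] using hn
      rcases ih this with ⟨q, hq, hnq⟩
      exact ⟨q, List.mem_cons_of_mem _ hq, hnq⟩

-- _is_reachable: inner neighbour scan (early return True when neighbor == end → none)
def pvScanA (e : Int) : List Int → PySem.Set Int → List Int → Option (PySem.Set Int × List Int)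
  | [], v, q => some (v, q)
  | n :: ns, v, q =>
    if n == e then none
    else if PySem.Set.contains v n then pvScanA e ns v q
    else pvScanA e ns (PySem.Set.add v n) (q ++ [n])

theorem pvScanA_measure (univ : List Int) (hu : univ.Nodup) (e : Int) :
    ∀ (ns : List Int) (v : PySem.Set Int) (q : List Int) (v' : PySem.Set Int) (q' : List Int),
      (∀ n ∈ ns, n ∈ univ) → pvScanA e ns v q = some (v', q') →
      2 * pvCnt univ v' + q'.length ≤ 2 * pvCnt univ v + q.length := by
  intro ns
  induction ns with
  | nil => intro v q v' q' _ h; simp [pvScanA] at h; simp [h.1, h.2]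
  | cons n ns ih =>
    intro v q v' q' hns h
    simp only [pvScanA] at h
    split at h
    · simp at h
    · split at h
      · exact ih v q v' q' (fun m hm => hns m (List.mem_cons_of_mem _ hm)) h
      · next hc =>
        have hnv : n ∉ v := by simpa [PySem.Set.contains] using hc
        have hrec := ih (PySem.Set.add v n) (q ++ [n]) v' q'
          (fun m hm => hns m (List.mem_cons_of_mem _ hm)) h
        have hadd := pvCnt_add univ hu v n (hns n List.mem_cons_self) hnv
        simp [List.length_append] at hrec
        omega

-- _is_reachable: the while-queue loop
def pvReachLoop (g : PySem.Dict Int (List Int)) (e : Int) (v : PySem.Set Int) (q : List Int) : Bool :=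
  match q with
  | [] => false
  | node :: rest =>
    match h : pvScanA e (g.getD node []) v rest with
    | none => true
    | some (v', q') => pvReachLoop g e v' q'
termination_by 2 * pvCnt (pvUniv g.items) v + q.length
decreasing_by
  have := pvScanA_measure (pvUniv g.items) (PySem.Set.nodup_ofList _) e
    (g.getD node []) v rest v' q' (fun n hn => pv_getD_sub g node n hn) h
  simp
  omega

def pvIsReachable (g : PySem.Dict Int (List Int)) (s e : Int) : Bool :=
  if s == e then true
  else pvReachLoop g e (PySem.Set.ofList [s]) [s]

-- one depth level of A: for atom in current_level, for neighbor in original_graph.get(atom, [])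
def pvStepA (og cg : PySem.Dict Int (List Int)) (s : Int)
    (st : PySem.Set Int × PySem.Set Int) : PySem.Set Int × PySem.Set Int :=
  st.2.foldl (fun acc atom =>
    (og.getD atom []).foldl (fun acc2 n =>
      if PySem.Set.contains acc2.1 n then acc2
      else if pvIsReachable cg s n then (PySem.Set.add acc2.1 n, PySem.Set.add acc2.2 n)
      else acc2) acc) (st.1, PySem.Set.empty)

def get_local_subgraph_py (original_graph : List (Int × List Int)) (cut_graph : List (Int × List Int)) (start_atom : Int) (depth : Int) : List Int :=
  ((PySem.List.pyRange 0 depth 1).foldl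
    (fun st _ => pvStepA ⟨original_graph⟩ ⟨cut_graph⟩ start_atom st)
    (PySem.Set.ofList [start_atom], PySem.Set.ofList [start_atom])).1

-- ===== PORT B =====
-- component BFS in the cut graph: neighbour scan …
def pvCompScan : List Int → PySem.Set Int → List Int → PySem.Set Int × List Int
  | [], v, q => (v, q)
  | n :: ns, v, q =>
    if PySem.Set.contains v n then pvCompScan ns v q
    else pvCompScan ns (PySem.Set.add v n) (q ++ [n])

theorem pvCompScan_measure (univ : List Int) (hu : univ.Nodup) :
    ∀ (ns : List Int) (v : PySem.Set Int) (q : List Int),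
      (∀ n ∈ ns, n ∈ univ) →
      2 * pvCnt univ (pvCompScan ns v q).1 + (pvCompScan ns v q).2.length
        ≤ 2 * pvCnt univ v + q.length := by
  intro ns
  induction ns with
  | nil => intro v q _; simp [pvCompScan]
  | cons n ns ih =>
    intro v q hns
    simp only [pvCompScan]
    split
    · exact ih v q (fun m hm => hns m (List.mem_cons_of_mem _ hm))
    · next hc =>
      have hnv : n ∉ v := by simpa [PySem.Set.contains] using hc
      have hrec := ih (PySem.Set.add v n) (q ++ [n]) (fun m hm => hns m (List.mem_cons_of_mem _ hm))
      have hadd := pvCnt_add univ hu v n (hns n List.mem_cons_self) hnv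
      simp [List.length_append] at hrec
      omega

-- … and the while-queue loop collecting the whole component
def pvCompLoop (g : PySem.Dict Int (List Int)) (v : PySem.Set Int) (q : List Int) : PySem.Set Int :=
  match q with
  | [] => v
  | node :: rest =>
    pvCompLoop g (pvCompScan (g.getD node []) v rest).1 (pvCompScan (g.getD node []) v rest).2
termination_by 2 * pvCnt (pvUniv g.items) v + q.length
decreasing_by
  have := pvCompScan_measure (pvUniv g.items) (PySem.Set.nodup_ofList _)
    (g.getD node []) v rest (fun n hn => pv_getD_sub g node n hn)
  simp
  omega

def pvComponent (g : PySem.Dict Int (List Int)) (s : Int) : PySem.Set Int :=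
  pvCompLoop g (PySem.Set.ofList [s]) [s]

-- depth-limited BFS over the original graph: neighbour scan tagging new nodes with d+1 …
def pvBfsScan (comp : PySem.Set Int) (d1 : Int) :
    List Int → PySem.Set Int → List (Int × Int) → PySem.Set Int × List (Int × Int)
  | [], v, q => (v, q)
  | n :: ns, v, q =>
    if !PySem.Set.contains v n && PySem.Set.contains comp n then
      pvBfsScan comp d1 ns (PySem.Set.add v n) (q ++ [(n, d1)])
    else pvBfsScan comp d1 ns v q

theorem pvBfsScan_measure (univ : List Int) (hu : univ.Nodup) (comp : PySem.Set Int) (d1 : Int) :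
    ∀ (ns : List Int) (v : PySem.Set Int) (q : List (Int × Int)),
      (∀ n ∈ ns, n ∈ univ) →
      2 * pvCnt univ (pvBfsScan comp d1 ns v q).1 + (pvBfsScan comp d1 ns v q).2.length
        ≤ 2 * pvCnt univ v + q.length := by
  intro ns
  induction ns with
  | nil => intro v q _; simp [pvBfsScan]
  | cons n ns ih =>
    intro v q hns
    simp only [pvBfsScan]
    split
    · next hc =>
      have hnv : n ∉ v := by
        rcases Bool.and_eq_true_iff.mp hc with ⟨h1, _⟩
        simpa [PySem.Set.contains] using h1
      have hrec := ih (PySem.Set.add v n) (q ++ [(n, d1)]) (fun m hm => hns m (List.mem_cons_of_mem _ hm))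
      have hadd := pvCnt_add univ hu v n (hns n List.mem_cons_self) hnv
      simp [List.length_append] at hrec
      omega
    · exact ih v q (fun m hm => hns m (List.mem_cons_of_mem _ hm))

-- … and the single while-queue loop over (node, dist) pairs
def pvBfsLoop (og : PySem.Dict Int (List Int)) (comp : PySem.Set Int) (depth : Int)
    (v : PySem.Set Int) (q : List (Int × Int)) : PySem.Set Int :=
  match q with
  | [] => v
  | (node, d) :: rest =>
    if d < depth then
      pvBfsLoop og comp depth (pvBfsScan comp (d + 1) (og.getD node []) v rest).1
        (pvBfsScan comp (d + 1) (og.getD node []) v rest).2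
    else pvBfsLoop og comp depth v rest
termination_by 2 * pvCnt (pvUniv og.items) v + q.length
decreasing_by
  · have := pvBfsScan_measure (pvUniv og.items) (PySem.Set.nodup_ofList _) comp (d + 1)
      (og.getD node []) v rest (fun n hn => pv_getD_sub og node n hn)
    simp
    omega
  · simp

def get_local_subgraph_py_alt (original_graph : List (Int × List Int)) (cut_graph : List (Int × List Int)) (start_atom : Int) (depth : Int) : List Int :=
  pvBfsLoop ⟨original_graph⟩ (pvComponent ⟨cut_graph⟩ start_atom) depth
    (PySem.Set.ofList [start_atom]) [(start_atom, 0)]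

-- ===== PRECONDITION & SPEC =====
def Spec_get_local_subgraph_py (original_graph : List (Int × List Int)) (cut_graph : List (Int × List Int)) (start_atom : Int) (depth : Int) (out : List Int) : Prop := out = get_local_subgraph_py_alt original_graph cut_graph start_atom depth
instance (original_graph : List (Int × List Int)) (cut_graph : List (Int × List Int)) (start_atom : Int) (depth : Int) (out : List Int) : Decidable (Spec_get_local_subgraph_py original_graph cut_graph start_atom depth out) := by unfold Spec_get_local_subgraph_py; infer_instance

-- ===== CLAIM (what is proved, stated in full; the proofs are below) =====
def Claim_equal_get_local_subgraph_py : Prop := ∀ (original_graph : List (Int × List Int)) (cut_graph : List (Int × List Int)) (start_atom : Int) (depth : Int), Dom_get_local_subgraph_py original_graph cut_graph start_atom depth → Spec_get_local_subgraph_py original_graph cut_graph start_atom depth (get_local_subgraph_py original_graph cut_graph start_atom depth)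

-- ===== LEMMAS AND PROOFS =====

theorem pvCompScan_mem (ns : List Int) :
    ∀ (v : PySem.Set Int) (q : List Int) (x : Int),
      x ∈ (pvCompScan ns v q).1 ↔ x ∈ v ∨ x ∈ ns := by
  induction ns with
  | nil => intro v q x; simp [pvCompScan]
  | cons n ns ih =>
    intro v q x
    simp only [pvCompScan]
    split
    · next hc =>
      have hnv : n ∈ v := by simpa [PySem.Set.contains] using hc
      rw [ih]
      constructor
      · rintro (h | h)
        · exact Or.inl h
        · exact Or.inr (List.mem_cons_of_mem _ h)
      · rintro (h | h)
        · exact Or.inl h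
        · rcases List.mem_cons.mp h with rfl | h2
          · exact Or.inl hnv
          · exact Or.inr h2
    · rw [ih]
      simp only [PySem.Set.mem_add, List.mem_cons]
      tauto

theorem pvScanA_of_not_mem (e : Int) (ns : List Int) :
    ∀ (v : PySem.Set Int) (q : List Int), e ∉ ns →
      pvScanA e ns v q = some (pvCompScan ns v q) := by
  induction ns with
  | nil => intro v q _; simp [pvScanA, pvCompScan]
  | cons n ns ih =>
    intro v q he
    have hne : n ≠ e := fun hh => he (hh ▸ List.mem_cons_self)
    have he' : e ∉ ns := fun hh => he (List.mem_cons_of_mem _ hh)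
    simp only [pvScanA, pvCompScan]
    rw [if_neg (by simpa using hne)]
    split
    · exact ih v q he'
    · exact ih _ _ he'

theorem pvScanA_of_mem (e : Int) (ns : List Int) :
    ∀ (v : PySem.Set Int) (q : List Int), e ∈ ns → pvScanA e ns v q = none := by
  induction ns with
  | nil => intro v q h; cases h
  | cons n ns ih =>
    intro v q he
    by_cases hne : n = e
    · simp [pvScanA, hne]
    · have he' : e ∈ ns := (List.mem_cons.mp he).resolve_left (fun hh => hne hh.symm)
      simp only [pvScanA]
      rw [if_neg (by simpa using hne)]
      split
      · exact ih _ _ he'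
      · exact ih _ _ he'

theorem pvCompLoop_mono (g : PySem.Dict Int (List Int)) (v : PySem.Set Int) (q : List Int)
    (x : Int) (hx : x ∈ v) : x ∈ pvCompLoop g v q := by
  induction v, q using pvCompLoop.induct g with
  | case1 v => simpa [pvCompLoop] using hx
  | case2 v node rest ih =>
    rw [pvCompLoop]
    exact ih ((pvCompScan_mem _ _ _ _).mpr (Or.inl hx))

theorem pvReachLoop_eq (g : PySem.Dict Int (List Int)) (e : Int)
    (v : PySem.Set Int) (q : List Int) (hv : e ∉ v) :
    pvReachLoop g e v q = PySem.Set.contains (pvCompLoop g v q) e := by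
  induction v, q using pvReachLoop.induct g e with
  | case1 v =>
    rw [pvReachLoop, pvCompLoop]
    have : PySem.Set.contains v e = false := by
      simp [PySem.Set.contains]; exact hv
    rw [this]
  | case2 v node rest h =>
    have hmem : e ∈ g.getD node [] := by
      by_contra hne
      rw [pvScanA_of_not_mem e _ v rest hne] at h
      simp at h
    have hin : e ∈ pvCompLoop g (pvCompScan (g.getD node []) v rest).1
        (pvCompScan (g.getD node []) v rest).2 :=
      pvCompLoop_mono _ _ _ _ ((pvCompScan_mem _ _ _ _).mpr (Or.inr hmem))
    rw [pvReachLoop, pvCompLoop]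
    split
    · exact ((PySem.Set.contains_iff _ _).mpr hin).symm
    · next v2 q2 h2 =>
      rw [h] at h2
      simp at h2
  | case3 v node rest v' q' h ih =>
    have hnmem : e ∉ g.getD node [] := by
      intro hmem
      rw [pvScanA_of_mem e _ v rest hmem] at h
      simp at h
    have heq : (v', q') = pvCompScan (g.getD node []) v rest := by
      have h2 := pvScanA_of_not_mem e _ v rest hnmem
      rw [h] at h2
      exact Option.some.inj h2
    have hv1 : v' = (pvCompScan (g.getD node []) v rest).1 := congrArg Prod.fst heq
    have hq1 : q' = (pvCompScan (g.getD node []) v rest).2 := congrArg Prod.snd heq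
    have hv' : e ∉ v' := by
      rw [hv1]
      intro hmem
      rcases (pvCompScan_mem _ _ _ _).mp hmem with h1 | h1
      · exact hv h1
      · exact hnmem h1
    rw [pvReachLoop, pvCompLoop]
    split
    · next h2 =>
      rw [h] at h2
      simp at h2
    · next v2 q2 h2 =>
      rw [h] at h2
      injection h2 with h3
      injection h3 with h4 h5
      subst h4
      subst h5
      rw [ih hv', hv1, hq1]

theorem pvIsReachable_eq (g : PySem.Dict Int (List Int)) (s e : Int) :
    pvIsReachable g s e = PySem.Set.contains (pvComponent g s) e := by
  unfold pvIsReachable pvComponent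
  by_cases h : s = e
  · subst h
    rw [if_pos (by simp)]
    have : s ∈ pvCompLoop g (PySem.Set.ofList [s]) [s] :=
      pvCompLoop_mono _ _ _ _ (by simp [PySem.Set.mem_ofList])
    exact ((PySem.Set.contains_iff _ _).mpr this).symm
  · rw [if_neg (by simpa using h)]
    have hv : e ∉ PySem.Set.ofList [s] := by
      simp only [PySem.Set.mem_ofList, List.mem_singleton]
      exact fun hh => h hh.symm
    exact pvReachLoop_eq g e _ _ hv

-- A's per-neighbor update, with reachability already replaced by component membership
def pvG (comp : PySem.Set Int) (acc2 : PySem.Set Int × PySem.Set Int) (n : Int) :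
    PySem.Set Int × PySem.Set Int :=
  if !PySem.Set.contains acc2.1 n && PySem.Set.contains comp n then
    (PySem.Set.add acc2.1 n, PySem.Set.add acc2.2 n)
  else acc2

-- A's level fold with a general accumulator
def pvF (og : PySem.Dict Int (List Int)) (comp : PySem.Set Int)
    (st : PySem.Set Int × PySem.Set Int) (cur : List Int) : PySem.Set Int × PySem.Set Int :=
  cur.foldl (fun acc atom => (og.getD atom []).foldl (pvG comp) acc) st

def pvIter {α : Type} (f : α → α) : Nat → α → α
  | 0, st => st
  | m + 1, st => pvIter f m (f st)

theorem pvStepA_eq_pvF (og cg : PySem.Dict Int (List Int)) (s : Int)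
    (st : PySem.Set Int × PySem.Set Int) :
    pvStepA og cg s st = pvF og (pvComponent cg s) (st.1, PySem.Set.empty) st.2 := by
  unfold pvStepA pvF
  congr 1
  funext acc atom
  congr 1
  funext acc2 n
  unfold pvG
  rw [pvIsReachable_eq]
  by_cases h1 : n ∈ acc2.1 <;> by_cases h2 : n ∈ pvComponent cg s <;>
    simp [PySem.Set.contains, h1, h2]

theorem pvFoldl_const {α β : Type} (f : α → α) :
    ∀ (l : List β) (init : α), l.foldl (fun st _ => f st) init = pvIter f l.length init := by
  intro l
  induction l with
  | nil => intro init; simp [pvIter]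
  | cons b l ih => intro init; simp [pvIter, ih]

theorem pvBfsScan_sim (comp : PySem.Set Int) (k : Int) :
    ∀ (ns : List Int) (v next : PySem.Set Int) (q0 : List (Int × Int)),
      (∀ x ∈ next, x ∈ v) →
      pvBfsScan comp k ns v (q0 ++ next.map (fun x => (x, k)))
        = ((ns.foldl (pvG comp) (v, next)).1,
           q0 ++ (ns.foldl (pvG comp) (v, next)).2.map (fun x => (x, k)))
      ∧ (∀ x ∈ (ns.foldl (pvG comp) (v, next)).2, x ∈ (ns.foldl (pvG comp) (v, next)).1) := by
  intro ns
  induction ns with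
  | nil => intro v next q0 h; simp [pvBfsScan]; exact h
  | cons n ns ih =>
    intro v next q0 h
    simp only [pvBfsScan, List.foldl_cons]
    by_cases hc : (!PySem.Set.contains v n && PySem.Set.contains comp n) = true
    · rw [if_pos hc]
      have hG : pvG comp (v, next) n = (PySem.Set.add v n, PySem.Set.add next n) := by
        simp only [pvG]; rw [if_pos hc]
      have hnv : n ∉ v := by
        rcases Bool.and_eq_true_iff.mp hc with ⟨h1, _⟩
        simpa [PySem.Set.contains] using h1
      have hnn : n ∉ next := fun hx => hnv (h n hx)
      have hadd : PySem.Set.add next n = next ++ [n] := PySem.Set.add_of_not_mem hnn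
      have hq : (q0 ++ next.map (fun x => (x, k))) ++ [(n, k)]
          = q0 ++ (PySem.Set.add next n).map (fun x => (x, k)) := by
        rw [hadd]; simp
      have h' : ∀ x ∈ PySem.Set.add next n, x ∈ PySem.Set.add v n := by
        intro x hx
        rcases (PySem.Set.mem_add _ _ _).mp hx with hx | hx
        · exact (PySem.Set.mem_add _ _ _).mpr (Or.inl (h x hx))
        · exact (PySem.Set.mem_add _ _ _).mpr (Or.inr hx)
      rw [hq, hG]
      exact ih (PySem.Set.add v n) (PySem.Set.add next n) q0 h'
    · rw [if_neg hc]
      have hG : pvG comp (v, next) n = (v, next) := by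
        simp only [pvG]; rw [if_neg hc]
      rw [hG]
      exact ih v next q0 h

theorem pvBfsLoop_drop (og : PySem.Dict Int (List Int)) (comp : PySem.Set Int) (depth : Int) :
    ∀ (q : List (Int × Int)) (v : PySem.Set Int),
      (∀ p ∈ q, ¬ p.2 < depth) → pvBfsLoop og comp depth v q = v := by
  intro q
  induction q with
  | nil => intro v _; rw [pvBfsLoop]
  | cons p rest ih =>
    intro v hq
    obtain ⟨node, d⟩ := p
    rw [pvBfsLoop]
    rw [if_neg (hq (node, d) List.mem_cons_self)]
    exact ih v (fun p hp => hq p (List.mem_cons_of_mem _ hp))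

-- run one whole level: the queue holds the rest of the current level (tag k < depth)
-- followed by the next level built so far (tag k+1)
theorem pvBfsLoop_level (og : PySem.Dict Int (List Int)) (comp : PySem.Set Int) (depth k : Int)
    (hk : k < depth) :
    ∀ (cur : List Int) (next v : PySem.Set Int), (∀ x ∈ next, x ∈ v) →
      pvBfsLoop og comp depth v
          (cur.map (fun x => (x, k)) ++ next.map (fun x => (x, k + 1)))
        = pvBfsLoop og comp depth (pvF og comp (v, next) cur).1
            ((pvF og comp (v, next) cur).2.map (fun x => (x, k + 1))) := by
  intro cur
  induction cur with
  | nil => intro next v _; simp [pvF]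
  | cons n cur' ih =>
    intro next v h
    simp only [List.map_cons, List.cons_append]
    rw [pvBfsLoop, if_pos hk]
    have hs := pvBfsScan_sim comp (k + 1) (og.getD n []) v next
      (cur'.map (fun x => (x, k))) h
    rw [hs.1]
    rw [ih _ _ hs.2]
    have : pvF og comp (v, next) (n :: cur')
        = pvF og comp ((og.getD n []).foldl (pvG comp) (v, next)) cur' := by
      simp [pvF]
    rw [this]

theorem pvBfsLoop_iter (og : PySem.Dict Int (List Int)) (comp : PySem.Set Int) (depth : Int) :
    ∀ (m : Nat) (cur : List Int) (v : PySem.Set Int),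
      pvBfsLoop og comp depth v (cur.map (fun x => (x, depth - m - 1)))
        = (pvIter (fun st => pvF og comp (st.1, PySem.Set.empty) st.2) m
            (pvF og comp (v, PySem.Set.empty) cur)).1 := by
  intro m
  induction m with
  | zero =>
    intro cur v
    have := pvBfsLoop_level og comp depth (depth - (0:Nat) - 1) (by omega) cur
      PySem.Set.empty v (by intro x hx; cases hx)
    simp only [PySem.Set.empty, List.map_nil, List.append_nil] at this
    rw [this]
    apply pvBfsLoop_drop
    intro p hp
    rcases List.mem_map.mp hp with ⟨x, _, rfl⟩
    omega
  | succ m' ih =>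
    intro cur v
    have := pvBfsLoop_level og comp depth (depth - (m' + 1 : Nat) - 1) (by push_cast; omega) cur
      PySem.Set.empty v (by intro x hx; cases hx)
    simp only [PySem.Set.empty, List.map_nil, List.append_nil] at this
    rw [this]
    have hk : depth - (m' + 1 : Nat) - 1 + 1 = depth - (m' : Nat) - 1 := by push_cast; ring
    rw [hk]
    rw [ih]
    rfl

-- ===== VERDICT (by name: the statement is the Claim_ definition above) =====
theorem get_local_subgraph_py_spec : Claim_equal_get_local_subgraph_py := by
  intro og cg s depth _
  unfold Spec_get_local_subgraph_py get_local_subgraph_py get_local_subgraph_py_alt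
  have hfold : (PySem.List.pyRange 0 depth 1).foldl
      (fun st _ => pvStepA ⟨og⟩ ⟨cg⟩ s st)
      (PySem.Set.ofList [s], PySem.Set.ofList [s])
      = pvIter (fun st => pvStepA ⟨og⟩ ⟨cg⟩ s st) (PySem.List.pyRange 0 depth 1).length
          (PySem.Set.ofList [s], PySem.Set.ofList [s]) :=
    pvFoldl_const _ _ _
  have hstep : (fun st => pvStepA (⟨og⟩ : PySem.Dict Int (List Int)) ⟨cg⟩ s st)
      = (fun st => pvF ⟨og⟩ (pvComponent ⟨cg⟩ s) (st.1, PySem.Set.empty) st.2) := by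
    funext st; exact pvStepA_eq_pvF ⟨og⟩ ⟨cg⟩ s st
  have hlen : (PySem.List.pyRange 0 depth 1).length = (depth).toNat := by
    rw [PySem.List.length_pyRange_one]; omega
  rw [hfold, hstep, hlen]
  by_cases hd : depth ≤ 0
  · have : depth.toNat = 0 := by omega
    rw [this]
    rw [pvBfsLoop]
    rw [if_neg (by omega)]
    rw [pvBfsLoop]
    rfl
  · have hm : depth.toNat = (depth.toNat - 1) + 1 := by omega
    have hq : ([(s, 0)] : List (Int × Int))
        = ([s] : List Int).map (fun x => (x, depth - (depth.toNat - 1 : Nat) - 1)) := by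
      simp only [List.map_cons, List.map_nil]
      have : depth - (depth.toNat - 1 : Nat) - 1 = 0 := by omega
      rw [this]
    rw [hq, pvBfsLoop_iter]
    rw [hm]
    rfl
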